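-- pv_equiv track=rewrite | github.com/BertCalm/XO_OX-XOmnibus | Tools/xpn_keygroup_export.py | _compute_zones
-- ===== SOURCE A (Python) =====
-- from typing import Dict, List, Optional, Tuple
--
-- def _compute_zones(
--     root_midi_notes: List[int],
--     full_range: Tuple[int, int] = (0, 127),
--     strategy: str = "midpoint",
-- ) -> List[Tuple[int, int, int]]:
--     """
--     Given a sorted list of root MIDI notes, compute (low, root, high) zone
--     triples that span [full_range[0], full_range[1]] with no gaps.
--
--     strategy:
--         "midpoint"    — zone boundary is midpoint between adjacent roots (default)
--         "chromatic"   — each root gets exactly 1 semitone (unisons only; usually wrong)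
--         "every-third" — zones are sized for samples taken every 3 semitones
--         "per-octave"  — zones cover one octave each (12 semitones)
--     """
--     if not root_midi_notes:
--         return []
--
--     notes = sorted(set(root_midi_notes))
--
--     if strategy == "chromatic":
--         zones = []
--         lo = full_range[0]
--         for i, root in enumerate(notes):
--             hi = root if i < len(notes) - 1 else full_range[1]
--             zones.append((lo, root, hi))
--             lo = hi + 1
--         return zones
--
--     if strategy == "every-third":
--         # Each sample covers ±1 semitone around root
--         zones = []
--         lo = full_range[0]
--         for i, root in enumerate(notes):
--             hi = (root + 1) if i < len(notes) - 1 else full_range[1]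
--             zones.append((lo, root, hi))
--             lo = hi + 1
--         return zones
--
--     if strategy == "per-octave":
--         zones = []
--         lo = full_range[0]
--         for i, root in enumerate(notes):
--             if i < len(notes) - 1:
--                 hi = notes[i + 1] - 1
--             else:
--                 hi = full_range[1]
--             zones.append((lo, root, hi))
--             lo = hi + 1
--         return zones
--
--     # Default: midpoint strategy
--     zones = []
--     lo = full_range[0]
--     for i, root in enumerate(notes):
--         if i < len(notes) - 1:
--             next_root = notes[i + 1]
--             hi = (root + next_root) // 2
--         else:
--             hi = full_range[1]
--         zones.append((lo, root, hi))
--         lo = hi + 1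
--     return zones
-- ===== SOURCE B (Python) =====
-- def _zone_hi(notes, i, top, strategy):
--     # upper bound of zone i, computed directly from notes[i], notes[i+1]
--     if i == len(notes) - 1:
--         return top
--     r, nxt = notes[i], notes[i + 1]
--     if strategy == "chromatic":
--         return r
--     if strategy == "every-third":
--         return r + 1
--     if strategy == "per-octave":
--         return nxt - 1
--     return (r + nxt) // 2
--
--
-- def _zone_lo(notes, i, bottom, strategy):
--     # lower bound of zone i, algebraically simplified from hi(i-1) + 1
--     if i == 0:
--         return bottom
--     p, r = notes[i - 1], notes[i]
--     if strategy == "chromatic":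
--         return p + 1
--     if strategy == "every-third":
--         return p + 2
--     if strategy == "per-octave":
--         return r
--     return (p + r) // 2 + 1
--
--
-- def _compute_zones(root_midi_notes, full_range=(0, 127), strategy="midpoint"):
--     notes = sorted(set(root_midi_notes))
--     return [(_zone_lo(notes, i, full_range[0], strategy),
--              notes[i],
--              _zone_hi(notes, i, full_range[1], strategy))
--             for i in range(len(notes))]
-- ===== Notes on version B (the rewrite author's own statement) =====
-- stated objective: alternative
-- what changed: Zones are computed independently per index by random access: each zone's lower bound comes from its own algebraically-derived closed formula over (notes[i-1], notes[i]) (chromatic p+1, every-third p+2, per-octave notes[i], midpoint (p+r)//2+1) instead of being threaded as hi+1 state through a loop or read off a precomputed boundary table; the empty-input guard disappears.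
import Mathlib
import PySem

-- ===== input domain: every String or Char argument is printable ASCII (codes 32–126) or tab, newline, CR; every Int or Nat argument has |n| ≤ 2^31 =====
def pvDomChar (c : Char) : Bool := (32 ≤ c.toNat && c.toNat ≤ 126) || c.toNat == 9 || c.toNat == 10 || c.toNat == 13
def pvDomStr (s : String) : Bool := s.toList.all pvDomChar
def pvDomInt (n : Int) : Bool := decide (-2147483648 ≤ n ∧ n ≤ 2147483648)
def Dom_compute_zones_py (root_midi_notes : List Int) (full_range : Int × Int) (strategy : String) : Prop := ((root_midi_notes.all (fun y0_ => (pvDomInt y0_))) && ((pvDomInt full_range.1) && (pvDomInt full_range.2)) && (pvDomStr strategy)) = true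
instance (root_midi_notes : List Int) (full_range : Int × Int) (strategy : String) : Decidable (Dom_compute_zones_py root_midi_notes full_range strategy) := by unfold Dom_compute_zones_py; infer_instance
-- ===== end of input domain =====

-- B computes each zone independently by random access: the lower bound of zone i is its own
-- algebraically-derived closed formula over (notes[i-1], notes[i]) instead of state threaded
-- through a loop; objective: alternative decomposition, same cost.

-- ===== PORT A =====
-- Each Python strategy loop ('for i, root in enumerate(notes)' threading lo) becomes the
-- obvious structural recursion; 'i < len(notes) - 1' is 'the tail is nonempty'.
def aLoopChrom (fr1 : Int) : Int → List Int → List (Int × Int × Int)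
  | _, [] => []
  | lo, [r] => [(lo, r, fr1)]
  | lo, r :: r2 :: rest => (lo, r, r) :: aLoopChrom fr1 (r + 1) (r2 :: rest)

def aLoopThird (fr1 : Int) : Int → List Int → List (Int × Int × Int)
  | _, [] => []
  | lo, [r] => [(lo, r, fr1)]
  | lo, r :: r2 :: rest => (lo, r, r + 1) :: aLoopThird fr1 (r + 1 + 1) (r2 :: rest)

def aLoopOct (fr1 : Int) : Int → List Int → List (Int × Int × Int)
  | _, [] => []
  | lo, [r] => [(lo, r, fr1)]
  | lo, r :: r2 :: rest => (lo, r, r2 - 1) :: aLoopOct fr1 (r2 - 1 + 1) (r2 :: rest)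

def aLoopMid (fr1 : Int) : Int → List Int → List (Int × Int × Int)
  | _, [] => []
  | lo, [r] => [(lo, r, fr1)]
  | lo, r :: r2 :: rest =>
    (lo, r, PySem.Int.floordiv (r + r2) 2) :: aLoopMid fr1 (PySem.Int.floordiv (r + r2) 2 + 1) (r2 :: rest)

def compute_zones_py (root_midi_notes : List Int) (full_range : Int × Int) (strategy : String) : List (Int × Int × Int) :=
  if root_midi_notes = [] then []
  else
    let notes := PySem.List.sorted (PySem.Set.ofList root_midi_notes) (fun x => x) false
    if strategy = "chromatic" then aLoopChrom full_range.2 full_range.1 notes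
    else if strategy = "every-third" then aLoopThird full_range.2 full_range.1 notes
    else if strategy = "per-octave" then aLoopOct full_range.2 full_range.1 notes
    else aLoopMid full_range.2 full_range.1 notes

-- ===== PORT B =====
-- _zone_hi: notes[i]/notes[i+1] are always in range when called (i < len-1), so pyGetD is exact.
def bZoneHi (notes : List Int) (i : Int) (top : Int) (strategy : String) : Int :=
  if i = PySem.List.len notes - 1 then top
  else
    let r := PySem.List.pyGetD notes i 0
    let nxt := PySem.List.pyGetD notes (i + 1) 0
    if strategy = "chromatic" then r
    else if strategy = "every-third" then r + 1
    else if strategy = "per-octave" then nxt - 1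
    else PySem.Int.floordiv (r + nxt) 2

-- _zone_lo: notes[i-1]/notes[i] are always in range when called (0 < i < len), so pyGetD is exact.
def bZoneLo (notes : List Int) (i : Int) (bottom : Int) (strategy : String) : Int :=
  if i = 0 then bottom
  else
    let p := PySem.List.pyGetD notes (i - 1) 0
    let r := PySem.List.pyGetD notes i 0
    if strategy = "chromatic" then p + 1
    else if strategy = "every-third" then p + 2
    else if strategy = "per-octave" then r
    else PySem.Int.floordiv (p + r) 2 + 1

def compute_zones_py_alt (root_midi_notes : List Int) (full_range : Int × Int) (strategy : String) : List (Int × Int × Int) :=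
  let notes := PySem.List.sorted (PySem.Set.ofList root_midi_notes) (fun x => x) false
  (PySem.List.pyRange 0 (PySem.List.len notes) 1).map
    (fun i => (bZoneLo notes i full_range.1 strategy,
               PySem.List.pyGetD notes i 0,
               bZoneHi notes i full_range.2 strategy))

-- ===== PRECONDITION & SPEC =====
def Spec_compute_zones_py (root_midi_notes : List Int) (full_range : Int × Int) (strategy : String) (out : List (Int × Int × Int)) : Prop := out = compute_zones_py_alt root_midi_notes full_range strategy
instance (root_midi_notes : List Int) (full_range : Int × Int) (strategy : String) (out : List (Int × Int × Int)) : Decidable (Spec_compute_zones_py root_midi_notes full_range strategy out) := by unfold Spec_compute_zones_py; infer_instance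

-- ===== CLAIM (what is proved, stated in full; the proofs are below) =====
def Claim_equal_compute_zones_py : Prop := ∀ (root_midi_notes : List Int) (full_range : Int × Int) (strategy : String), Dom_compute_zones_py root_midi_notes full_range strategy → Spec_compute_zones_py root_midi_notes full_range strategy (compute_zones_py root_midi_notes full_range strategy)

-- ===== LEMMAS AND PROOFS =====

-- Proof-side generic loop covering A's four (f computes hi from a root and its successor).
def genLoop (f : Int → Int → Int) (fr1 : Int) : Int → List Int → List (Int × Int × Int)
  | _, [] => []
  | lo, [r] => [(lo, r, fr1)]
  | lo, r :: r2 :: rest => (lo, r, f r r2) :: genLoop f fr1 (f r r2 + 1) (r2 :: rest)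

def fStrat (s : String) (r nxt : Int) : Int :=
  if s = "chromatic" then r
  else if s = "every-third" then r + 1
  else if s = "per-octave" then nxt - 1
  else PySem.Int.floordiv (r + nxt) 2

theorem aLoopChrom_eq (fr1 : Int) : ∀ (ns : List Int) (lo : Int),
    aLoopChrom fr1 lo ns = genLoop (fun r _ => r) fr1 lo ns
  | [], _ => rfl
  | [_], _ => rfl
  | r :: r2 :: rest, lo => by
    simp [aLoopChrom, genLoop, aLoopChrom_eq fr1 (r2 :: rest)]

theorem aLoopThird_eq (fr1 : Int) : ∀ (ns : List Int) (lo : Int),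
    aLoopThird fr1 lo ns = genLoop (fun r _ => r + 1) fr1 lo ns
  | [], _ => rfl
  | [_], _ => rfl
  | r :: r2 :: rest, lo => by
    simp [aLoopThird, genLoop, aLoopThird_eq fr1 (r2 :: rest)]

theorem aLoopOct_eq (fr1 : Int) : ∀ (ns : List Int) (lo : Int),
    aLoopOct fr1 lo ns = genLoop (fun _ r2 => r2 - 1) fr1 lo ns
  | [], _ => rfl
  | [_], _ => rfl
  | r :: r2 :: rest, lo => by
    simp [aLoopOct, genLoop, aLoopOct_eq fr1 (r2 :: rest)]

theorem aLoopMid_eq (fr1 : Int) : ∀ (ns : List Int) (lo : Int),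
    aLoopMid fr1 lo ns = genLoop (fun r r2 => PySem.Int.floordiv (r + r2) 2) fr1 lo ns
  | [], _ => rfl
  | [_], _ => rfl
  | r :: r2 :: rest, lo => by
    simp [aLoopMid, genLoop, aLoopMid_eq fr1 (r2 :: rest)]

theorem genLoop_length (f : Int → Int → Int) (fr1 : Int) : ∀ (ns : List Int) (lo : Int),
    (genLoop f fr1 lo ns).length = ns.length
  | [], _ => rfl
  | [_], _ => rfl
  | r :: r2 :: rest, lo => by
    simp [genLoop, genLoop_length f fr1 (r2 :: rest)]

-- Closed form for the k-th zone of the generic loop (total getD indexing).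
theorem genLoop_getD (f : Int → Int → Int) (fr1 : Int) : ∀ (ns : List Int) (lo : Int)
    (k : Nat) (hk : k < ns.length),
    (genLoop f fr1 lo ns)[k]'(by rw [genLoop_length]; exact hk) =
      ((if k = 0 then lo else f (ns.getD (k-1) 0) (ns.getD k 0) + 1),
       ns.getD k 0,
       (if k = ns.length - 1 then fr1 else f (ns.getD k 0) (ns.getD (k+1) 0)))
  | [], _, k, hk => by simp at hk
  | [r], lo, k, hk => by
    have hk0 : k = 0 := by simp at hk; omega
    subst hk0
    simp [genLoop]
  | r :: r2 :: rest, lo, k, hk => by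
    match k with
    | 0 =>
      simp [genLoop]
    | (j+1) =>
      have ih := genLoop_getD f fr1 (r2 :: rest) (f r r2 + 1) j (by simpa using hk)
      simp only [genLoop, List.getElem_cons_succ]
      rw [ih]
      match j with
      | 0 =>
        have h3 : (0 = rest.length) ↔ (rest = []) := by
          rw [eq_comm, List.length_eq_zero_iff]
        simp [h3]
      | (m+1) =>
        simp

-- ===== VERDICT (by name: the statement is the Claim_ definition above) =====
theorem compute_zones_py_spec : Claim_equal_compute_zones_py := by
  intro rmn fr s _
  unfold Spec_compute_zones_py
  by_cases h0 : rmn = []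
  · subst h0
    rfl
  · have hA : compute_zones_py rmn fr s
        = genLoop (fStrat s) fr.2 fr.1 (PySem.List.sorted (PySem.Set.ofList rmn) (fun x => x) false) := by
      unfold compute_zones_py
      rw [if_neg h0]
      by_cases h1 : s = "chromatic"
      · rw [if_pos h1, aLoopChrom_eq]
        congr 1; funext r nxt; simp [fStrat, h1]
      · rw [if_neg h1]
        by_cases h2 : s = "every-third"
        · rw [if_pos h2, aLoopThird_eq]
          congr 1; funext r nxt; simp [fStrat, h2]
        · rw [if_neg h2]
          by_cases h3 : s = "per-octave"
          · rw [if_pos h3, aLoopOct_eq]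
            congr 1; funext r nxt; simp [fStrat, h3]
          · rw [if_neg h3, aLoopMid_eq]
            congr 1; funext r nxt; simp [fStrat, h1, h2, h3]
    rw [hA]
    set ns := PySem.List.sorted (PySem.Set.ofList rmn) (fun x => x) false with hns
    simp only [compute_zones_py_alt, ← hns, PySem.List.len_eq, PySem.List.pyRange_one,
      List.map_map]
    apply List.ext_getElem
    · simp [genLoop_length]
    · intro k h1 h2
      have hk : k < ns.length := by
        simpa [genLoop_length] using h1
      rw [genLoop_getD (fStrat s) fr.2 ns fr.1 k hk]
      simp only [List.getElem_map, List.getElem_range, Function.comp_apply, zero_add]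
      have hmid : PySem.List.pyGetD ns (k : Int) 0 = ns.getD k 0 := by
        simp [PySem.List.pyGetD_natCast]
      have hhi : bZoneHi ns (k : Int) fr.2 s
          = (if k = ns.length - 1 then fr.2 else fStrat s (ns.getD k 0) (ns.getD (k+1) 0)) := by
        unfold bZoneHi fStrat
        rw [PySem.List.len_eq]
        by_cases hlast : k = ns.length - 1
        · rw [if_pos (by omega), if_pos hlast]
        · rw [if_neg (by omega), if_neg hlast]
          have e2 : PySem.List.pyGetD ns ((k : Int) + 1) 0 = ns.getD (k+1) 0 := by
            have h : ((k : Int) + 1) = ((k + 1 : Nat) : Int) := by push_cast; ring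
            rw [h, PySem.List.pyGetD_natCast]
          rw [hmid, e2]
      have hlo : bZoneLo ns (k : Int) fr.1 s
          = (if k = 0 then fr.1 else fStrat s (ns.getD (k-1) 0) (ns.getD k 0) + 1) := by
        unfold bZoneLo fStrat
        by_cases hz : k = 0
        · rw [if_pos (by exact_mod_cast hz), if_pos hz]
        · rw [if_neg (by exact_mod_cast hz), if_neg hz]
          have e1 : PySem.List.pyGetD ns ((k : Int) - 1) 0 = ns.getD (k-1) 0 := by
            have h : ((k : Int) - 1) = ((k - 1 : Nat) : Int) := by omega
            rw [h, PySem.List.pyGetD_natCast]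
          rw [e1, hmid]
          by_cases s1 : s = "chromatic"
          · simp [s1]
          · rw [if_neg s1, if_neg s1]
            by_cases s2 : s = "every-third"
            · simp [s2]; ring
            · rw [if_neg s2, if_neg s2]
              by_cases s3 : s = "per-octave"
              · simp [s3]
              · rw [if_neg s3, if_neg s3]
      rw [hmid, hhi, hlo]
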